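-- pv_equiv track=rewrite | github.com/VarimaDudeja/DBMS-2025 | DBMS Project sample/ExtractingInfo.py | extract_publisher_info
-- ===== SOURCE A (Python) =====
-- def extract_publisher_info(text, api_publisher):
--     """
--     Extract original vs reprint publisher information
--     """
--     publisher_info = {
--         "original": api_publisher or "",
--         "reprint": ""
--     }
--
--     lines = text.split('\n')
--
--     for line in lines:
--         line_lower = line.lower()
--         if 'india' in line_lower and 'pearson' in line_lower:
--             publisher_info["reprint"] = "Pearson India Education Services Pvt. Ltd"
--         elif 'pearson' in line_lower and not publisher_info["original"]:
--             publisher_info["original"] = "Pearson Education"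
--
--     return publisher_info
-- ===== SOURCE B (Python) =====
-- def extract_publisher_info(text, api_publisher):
--     """
--     Extract original vs reprint publisher information
--     """
--     t = text.lower()
--     has_reprint = False
--     has_plain = False
--     i = t.find('pearson')
--     while i != -1:
--         # line containing this occurrence
--         start = t.rfind('\n', 0, i) + 1
--         end = t.find('\n', i)
--         if end == -1:
--             end = len(t)
--         if 'india' in t[start:end]:
--             has_reprint = True
--         else:
--             has_plain = True
--         i = t.find('pearson', end + 1)  # jump past this line
--     return {
--         "original": api_publisher or ("Pearson Education" if has_plain else ""),
--         "reprint": "Pearson India Education Services Pvt. Ltd" if has_reprint else "",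
--     }
-- ===== Notes on version B (the rewrite author's own statement) =====
-- stated objective: alternative
-- what changed: Replaces A's split-into-lines loop that mutates a dict under a first-match guard by a find/rfind-driven scan of the lowered whole text: it jumps from one 'pearson' occurrence to the next, delimits only that occurrence's line to test 'india', never materialises the line list, and builds the dict at the end from two flags (the assigned values are constants, so match order is irrelevant).
import Mathlib
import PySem

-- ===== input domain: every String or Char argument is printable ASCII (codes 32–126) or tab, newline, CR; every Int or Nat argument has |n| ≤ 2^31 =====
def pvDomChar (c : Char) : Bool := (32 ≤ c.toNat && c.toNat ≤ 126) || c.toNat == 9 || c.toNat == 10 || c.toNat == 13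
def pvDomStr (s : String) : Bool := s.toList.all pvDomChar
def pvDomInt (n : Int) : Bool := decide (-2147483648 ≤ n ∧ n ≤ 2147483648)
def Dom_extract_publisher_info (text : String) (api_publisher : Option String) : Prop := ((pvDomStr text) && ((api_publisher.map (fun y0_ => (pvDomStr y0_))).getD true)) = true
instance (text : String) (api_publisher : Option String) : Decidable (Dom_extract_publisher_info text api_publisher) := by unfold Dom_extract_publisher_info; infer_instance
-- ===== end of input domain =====

-- B replaces A's per-line loop (split + dict mutation) by a find/rfind-driven scan of the lowered
-- whole text that visits only the lines actually containing 'pearson' and builds the dict at the end: alternative algorithm.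


-- ===== PORT A =====
-- one loop step of A's for-loop (dict mutation with first-match guard on "original")
def pvStepA (d : PySem.Dict String String) (line : String) : PySem.Dict String String :=
  let line_lower := PySem.Str.lower line
  if PySem.Str.isIn "india" line_lower && PySem.Str.isIn "pearson" line_lower then
    d.insert "reprint" "Pearson India Education Services Pvt. Ltd"
  else if PySem.Str.isIn "pearson" line_lower && (d.getD "original" "" == "") then
    d.insert "original" "Pearson Education"
  else d

def extract_publisher_info (text : String) (api_publisher : Option String) : List (String × String) :=
  -- "api_publisher or \"\"": truthiness of an Optional[str]
  let orig0 : String := match api_publisher with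
    | none => ""
    | some s => if s == "" then "" else s
  let publisher_info : PySem.Dict String String :=
    PySem.Dict.ofList [("original", orig0), ("reprint", "")]
  let lines := (PySem.Str.split? text "\n").getD []
  (lines.foldl pvStepA publisher_info).items

-- ===== PORT B =====
-- the while-loop of Source B: i = current t.find('pearson', …) result; fuel only makes the recursion
-- structural (t.length + 1 steps always suffice, as the proof below shows)
def pvScanB (t : List Char) : Nat → Int → Bool → Bool → Bool × Bool
  | 0, _, has_reprint, has_plain => (has_reprint, has_plain)
  | fuel + 1, i, has_reprint, has_plain =>
    if i == -1 then (has_reprint, has_plain)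
    else
      let start := PySem.Chars.rfindFrom t ['\n'] 0 (some i) + 1
      let e0 := PySem.Chars.findFrom t ['\n'] i
      let e : Int := if e0 == -1 then (t.length : Int) else e0
      let seg := PySem.Chars.slice t (some start) (some e)
      if PySem.Chars.isIn "india".toList seg then
        pvScanB t fuel (PySem.Chars.findFrom t "pearson".toList (e + 1)) true has_plain
      else
        pvScanB t fuel (PySem.Chars.findFrom t "pearson".toList (e + 1)) has_reprint true

def extract_publisher_info_alt (text : String) (api_publisher : Option String) : List (String × String) :=
  let t := PySem.Str.lower text
  let p := pvScanB t.toList (t.toList.length + 1) (PySem.Str.find t "pearson") false false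
  let fallback : String := if p.2 then "Pearson Education" else ""
  let original : String := match api_publisher with
    | none => fallback
    | some s => if s == "" then fallback else s
  [("original", original),
   ("reprint", if p.1 then "Pearson India Education Services Pvt. Ltd" else "")]

-- ===== PRECONDITION & SPEC =====
def Spec_extract_publisher_info (text : String) (api_publisher : Option String) (out : List (String × String)) : Prop := out = extract_publisher_info_alt text api_publisher
instance (text : String) (api_publisher : Option String) (out : List (String × String)) : Decidable (Spec_extract_publisher_info text api_publisher out) := by unfold Spec_extract_publisher_info; infer_instance

-- ===== CLAIM (what is proved, stated in full; the proofs are below) =====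
def Claim_equal_extract_publisher_info : Prop := ∀ (text : String) (api_publisher : Option String), Dom_extract_publisher_info text api_publisher → Spec_extract_publisher_info text api_publisher (extract_publisher_info text api_publisher)

-- ===== LEMMAS AND PROOFS =====

-- the list of lines of a character list (what "\n"-splitting produces), structurally
def pvLines : List Char → List (List Char)
  | [] => [[]]
  | c :: r => if c = '\n' then [] :: pvLines r else (pvLines r).modifyHead (c :: ·)

theorem pvLines_ne_nil (u : List Char) : pvLines u ≠ [] := by
  induction u with
  | nil => simp [pvLines]
  | cons c r ih =>
      simp only [pvLines]
      split
      · simp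
      · cases hr : pvLines r with
        | nil => exact absurd hr ih
        | cons a t => simp

theorem head_pvLines_prefix : ∀ (u : List Char) (h : List Char) (tl : List (List Char)),
    pvLines u = h :: tl → h <+: u := by
  intro u
  induction u with
  | nil =>
      intro h tl he
      simp only [pvLines, List.cons.injEq] at he
      rw [← he.1]
  | cons c r ih =>
      intro h tl he
      simp only [pvLines] at he
      split at he
      · rename_i hc; cases he; subst hc; exact List.nil_prefix
      · cases hr : pvLines r with
        | nil => exact absurd hr (pvLines_ne_nil r)
        | cons a t =>
            rw [hr] at he
            simp only [List.modifyHead] at he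
            obtain ⟨rfl, rfl⟩ := (List.cons.injEq _ _ _ _).mp he
            exact List.cons_prefix_cons.mpr ⟨rfl, ih a t hr⟩

theorem mem_pvLines_infix : ∀ (u : List Char) (l : List Char), l ∈ pvLines u → l <:+: u := by
  intro u
  induction u with
  | nil => intro l hl; simp [pvLines] at hl; simp [hl]
  | cons c r ih =>
      intro l hl
      simp only [pvLines] at hl
      split at hl
      · rcases List.mem_cons.mp hl with h | h
        · simp [h]
        · exact (ih l h).trans (List.suffix_cons c r).isInfix
      · cases hr : pvLines r with
        | nil => exact absurd hr (pvLines_ne_nil r)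
        | cons a t =>
            rw [hr] at hl
            simp only [List.modifyHead] at hl
            rcases List.mem_cons.mp hl with h | h
            · subst h
              exact ((List.cons_prefix_cons.mpr ⟨rfl, head_pvLines_prefix r a t hr⟩)).isInfix
            · exact ((ih l (hr ▸ List.mem_cons_of_mem a h))).trans (List.suffix_cons c r).isInfix

theorem pvLines_append_nl : ∀ (u v : List Char), pvLines (u ++ '\n' :: v) = pvLines u ++ pvLines v := by
  intro u v
  induction u with
  | nil => simp [pvLines]
  | cons c r ih =>
      by_cases hc : c = '\n'
      · subst hc; simp [pvLines, ih]
      · simp only [List.cons_append, pvLines, if_neg hc, ih]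
        cases hr : pvLines r with
        | nil => exact absurd hr (pvLines_ne_nil r)
        | cons a t => simp

theorem pvLines_no_nl : ∀ (u : List Char), '\n' ∉ u → pvLines u = [u] := by
  intro u
  induction u with
  | nil => intro _; rfl
  | cons c r ih =>
      intro h
      have hc : c ≠ '\n' := fun hh => h (hh ▸ List.mem_cons_self)
      have hr : '\n' ∉ r := fun hh => h (List.mem_cons_of_mem c hh)
      simp [pvLines, hc, ih hr]

theorem modifyHead_idfun {α : Type} (l : List α) : List.modifyHead (fun x => x) l = l := by
  cases l <;> simp

-- splitting on a single newline is pvLines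
theorem splitOn_go_nl : ∀ (fuel : Nat) (l cur : List Char) (acc : List (List Char)),
    l.length ≤ fuel →
    PySem.Chars.splitOn.go ['\n'] fuel l cur acc
      = acc.reverse ++ (pvLines l).modifyHead (cur.reverse ++ ·) := by
  intro fuel
  induction fuel with
  | zero =>
      intro l cur acc hl
      have : l = [] := by cases l <;> simp_all
      subst this
      simp [PySem.Chars.splitOn.go, pvLines]
  | succ f ih =>
      intro l cur acc hl
      cases l with
      | nil => simp [PySem.Chars.splitOn.go, pvLines]
      | cons c rest =>
          have hl' : rest.length ≤ f := by simpa using hl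
          by_cases hc : c = '\n'
          · subst hc
            have hpre : (['\n'] : List Char).isPrefixOf ('\n' :: rest) = true := by
              simp [List.isPrefixOf]
            have hstep : PySem.Chars.splitOn.go ['\n'] (f+1) ('\n'::rest) cur acc
                = PySem.Chars.splitOn.go ['\n'] f rest [] (cur.reverse :: acc) := by
              simp [PySem.Chars.splitOn.go, hpre]
            rw [hstep, ih rest [] _ hl']
            simp [pvLines, modifyHead_idfun]
          · have hpre : (['\n'] : List Char).isPrefixOf (c :: rest) = false := by
              simp [List.isPrefixOf]
              exact fun h => hc h.symm
            have hstep : PySem.Chars.splitOn.go ['\n'] (f+1) (c :: rest) cur acc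
                = PySem.Chars.splitOn.go ['\n'] f rest (c :: cur) acc := by
              simp [PySem.Chars.splitOn.go, hpre]
            rw [hstep, ih rest (c :: cur) _ hl']
            simp only [pvLines, if_neg hc, List.modifyHead_modifyHead]
            cases hr : pvLines rest with
            | nil => exact absurd hr (pvLines_ne_nil rest)
            | cons a t => simp

theorem splitOn_nl_eq_pvLines (u : List Char) : PySem.Chars.splitOn u ['\n'] = pvLines u := by
  unfold PySem.Chars.splitOn
  rw [splitOn_go_nl (u.length + 1) u [] [] (by omega)]
  simp [modifyHead_idfun]

theorem lowerChar_eq_nl_iff (c : Char) : PySem.Chars.lowerChar c = '\n' ↔ c = '\n' := by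
  constructor
  · intro h
    unfold PySem.Chars.lowerChar PySem.Chars.isupper at h
    split at h
    · rename_i hu
      simp only [Bool.and_eq_true, decide_eq_true_eq] at hu
      have h1 : 65 ≤ c.toNat := hu.1
      have h2 : c.toNat ≤ 90 := hu.2
      have hv : (c.toNat + 32).isValidChar := by left; omega
      have h10 := congrArg Char.toNat h
      rw [Char.toNat_ofNat, if_pos hv] at h10
      have : ('\n').toNat = 10 := by decide
      omega
    · exact h
  · intro h; subst h; decide

theorem pvLines_lower (u : List Char) :
    pvLines (PySem.Chars.lower u) = (pvLines u).map PySem.Chars.lower := by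
  induction u with
  | nil => simp [pvLines, PySem.Chars.lower]
  | cons c r ih =>
      show pvLines (PySem.Chars.lowerChar c :: PySem.Chars.lower r) = _
      by_cases hc : c = '\n'
      · have hlc : PySem.Chars.lowerChar c = '\n' := (lowerChar_eq_nl_iff c).mpr hc
        simp only [pvLines, hlc, if_pos hc, ih, List.map_cons]
        rfl
      · have hlc : ¬ PySem.Chars.lowerChar c = '\n' := fun h => hc ((lowerChar_eq_nl_iff c).mp h)
        simp only [pvLines, if_neg hlc, if_neg hc, ih]
        cases hr : pvLines r with
        | nil => exact absurd hr (pvLines_ne_nil r)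
        | cons a t => simp [PySem.Chars.lower]

-- characterisation of A's loop: final "original"/"reprint" values as any-existence facts
theorem foldA_char (lines : List String) (o r : String) :
    (lines.foldl pvStepA (PySem.Dict.mk [("original", o), ("reprint", r)])).items =
      [("original",
         if o == "" then
           (if lines.any (fun l => PySem.Str.isIn "pearson" (PySem.Str.lower l) &&
                                   !PySem.Str.isIn "india" (PySem.Str.lower l)) then
              "Pearson Education" else "")
         else o),
       ("reprint",
         if lines.any (fun l => PySem.Str.isIn "india" (PySem.Str.lower l) &&
                                PySem.Str.isIn "pearson" (PySem.Str.lower l)) then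
           "Pearson India Education Services Pvt. Ltd" else r)] := by
  induction lines generalizing o r with
  | nil =>
      simp only [List.foldl_nil, List.any_nil, Bool.false_eq_true, ite_false]
      by_cases h : o == ""
      · simp [beq_iff_eq.mp h]
      · simp [h]
  | cons l rest ih =>
      simp only [List.foldl_cons, List.any_cons, pvStepA]
      by_cases hq : (PySem.Str.isIn "india" (PySem.Str.lower l) &&
                     PySem.Str.isIn "pearson" (PySem.Str.lower l)) = true
      · have hnp : (PySem.Str.isIn "pearson" (PySem.Str.lower l) &&
                    !PySem.Str.isIn "india" (PySem.Str.lower l)) = false := by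
          simp only [Bool.and_eq_true] at hq
          simp only [hq.1, Bool.not_true, Bool.and_false]
        rw [if_pos hq]
        have hins : (PySem.Dict.mk [("original", o), ("reprint", r)]).insert "reprint"
            "Pearson India Education Services Pvt. Ltd"
            = PySem.Dict.mk [("original", o),
                ("reprint", "Pearson India Education Services Pvt. Ltd")] := by
          simp [PySem.Dict.insert]
        rw [hins, ih]
        simp only [hq, hnp, Bool.true_or, Bool.false_or]
        simp
      · have hq' : (PySem.Str.isIn "india" (PySem.Str.lower l) &&
                    PySem.Str.isIn "pearson" (PySem.Str.lower l)) = false := by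
          simpa using hq
        rw [if_neg hq]
        have hgd : (PySem.Dict.mk [("original", o), ("reprint", r)]).getD "original" "" = o := by
          simp [PySem.Dict.getD, PySem.Dict.get?_mk_cons]
        rw [hgd]
        by_cases hp : (PySem.Str.isIn "pearson" (PySem.Str.lower l) && (o == "")) = true
        · have hp' := hp
          simp only [Bool.and_eq_true] at hp'
          obtain ⟨hpe, ho⟩ := hp'
          have hni : PySem.Str.isIn "india" (PySem.Str.lower l) = false := by
            cases hi : PySem.Str.isIn "india" (PySem.Str.lower l)
            · rfl
            · exact absurd (by simp only [hi, hpe, Bool.and_self]) hq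
          rw [if_pos hp]
          have hins : (PySem.Dict.mk [("original", o), ("reprint", r)]).insert "original"
              "Pearson Education"
              = PySem.Dict.mk [("original", "Pearson Education"), ("reprint", r)] := by
            simp [PySem.Dict.insert]
          rw [hins, ih]
          simp only [hpe, hni, ho, Bool.not_false, Bool.true_and, Bool.true_or]
          simp
        · rw [if_neg hp]
          rw [ih]
          by_cases ho : o == ""
          · have hpe : PySem.Str.isIn "pearson" (PySem.Str.lower l) = false := by
              cases hpl : PySem.Str.isIn "pearson" (PySem.Str.lower l)
              · rfl
              · exact absurd (by simp only [hpl, ho, Bool.true_and]) hp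
            simp only [hpe, Bool.false_and, Bool.and_false, Bool.false_or]
          · simp only [hq', Bool.false_or]
            simp [ho]

-- small generic helpers
theorem prefix_getElem? {p u : List Char} (h : p <+: u) {j : Nat} (hj : j < p.length) :
    u[j]? = some p[j] := by
  obtain ⟨s, rfl⟩ := h
  rw [List.getElem?_append_left hj, List.getElem?_eq_getElem hj]

theorem singleton_prefix_iff (u : List Char) (c : Char) : [c] <+: u ↔ u.head? = some c := by
  cases u with
  | nil => simp
  | cons a t => simp [List.cons_prefix_cons, eq_comm]

theorem scanB_neg_one (t : List Char) (f : Nat) (hr hp : Bool) :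
    pvScanB t f (-1) hr hp = (hr, hp) := by
  cases f <;> simp [pvScanB]

-- Python rfind of the hand-rolled kind: the HIGHEST occurrence position ≤ j, or -1
theorem rfind_go_spec (s sub : List Char) : ∀ (j : Nat),
    (PySem.Chars.rfind.go s sub j = -1 ∧ ∀ m ≤ j, ¬ sub <+: s.drop m) ∨
    (∃ m : Nat, PySem.Chars.rfind.go s sub j = m ∧ m ≤ j ∧ sub <+: s.drop m ∧
      ∀ m', m < m' → m' ≤ j → ¬ sub <+: s.drop m') := by
  intro j
  induction j with
  | zero =>
      by_cases h : sub.isPrefixOf s = true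
      · right
        exact ⟨0, by simp [PySem.Chars.rfind.go, h], Nat.le_refl 0,
          by simpa using List.isPrefixOf_iff_prefix.mp h, by omega⟩
      · left
        refine ⟨by simp [PySem.Chars.rfind.go, h], ?_⟩
        intro m hm
        interval_cases m
        simpa using fun hh => h (List.isPrefixOf_iff_prefix.mpr hh)
  | succ j ih =>
      have hgo : PySem.Chars.rfind.go s sub (j+1) =
          if sub.isPrefixOf (s.drop (j+1)) then ((j:Int)+1) else PySem.Chars.rfind.go s sub j := by
        simp [PySem.Chars.rfind.go]
      by_cases h : sub.isPrefixOf (s.drop (j+1)) = true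
      · right
        refine ⟨j+1, by simp [hgo, h], Nat.le_refl _, List.isPrefixOf_iff_prefix.mp h, ?_⟩
        intro m' h1 h2; omega
      · rw [hgo, if_neg h]
        have hnot : ¬ sub <+: s.drop (j+1) := fun hh => h (List.isPrefixOf_iff_prefix.mpr hh)
        rcases ih with ⟨he, hall⟩ | ⟨m, he, hle, hpre, hmax⟩
        · left
          refine ⟨he, fun m hm => ?_⟩
          rcases Nat.lt_or_ge m (j+1) with hm' | hm'
          · exact hall m (by omega)
          · have : m = j+1 := by omega
            subst this; exact hnot
        · right
          refine ⟨m, he, by omega, hpre, fun m' h1 h2 => ?_⟩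
          rcases Nat.lt_or_ge m' (j+1) with hm' | hm'
          · exact hmax m' h1 (by omega)
          · have : m' = j+1 := by omega
            subst this; exact hnot

theorem findFrom_past_len (t sub : List Char) (st : Int) (h : (t.length : Int) < st) :
    PySem.Chars.findFrom t sub st = -1 := by
  unfold PySem.Chars.findFrom
  have h0 : ¬ st < 0 := by omega
  simp only [h0, if_false, if_pos h]

-- THE LOOP INVARIANT of B's scan: starting the search at a line boundary k, the scan ORs into the
-- flags exactly the two existence facts over the remaining lines
-- rfind('\n', 0, i): position after the last newline before i, with its defining properties
theorem nl_prefix_drop_take_iff (t : List Char) (iN m : Nat) (him : iN ≤ t.length) :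
    (['\n'] <+: (t.take iN).drop m) ↔ (m < iN ∧ t[m]? = some '\n') := by
  rw [List.drop_take, singleton_prefix_iff, List.head?_take, List.head?_drop]
  constructor
  · intro h
    split at h
    · simp at h
    · rename_i hne; exact ⟨by omega, h⟩
  · intro ⟨h1, h2⟩
    rw [if_neg (by omega)]
    exact h2

theorem rfind_nl_start (t : List Char) (i : Int) (h0 : 0 ≤ i) (hle : i ≤ (t.length : Int)) :
    ∃ sN : Nat, PySem.Chars.rfindFrom t ['\n'] 0 (some i) + 1 = ↑sN ∧ sN ≤ i.toNat ∧
      (∀ j : Nat, sN ≤ j → j < i.toNat → t[j]? ≠ some '\n') ∧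
      (sN = 0 ∨ t[sN-1]? = some '\n') := by
  have hiN : i.toNat ≤ t.length := by omega
  have hrw : PySem.Chars.rfindFrom t ['\n'] 0 (some i)
      = (if PySem.Chars.rfind.go (t.take i.toNat) ['\n'] (t.take i.toNat).length = -1 then -1
         else PySem.Chars.rfind.go (t.take i.toNat) ['\n'] (t.take i.toNat).length) := by
    unfold PySem.Chars.rfindFrom PySem.Chars.rfind
    have h1 : ¬ (t.length : Int) < i := by omega
    have h2 : ¬ i < (0:Int) := by omega
    simp only [h1, if_false, h2, if_false, lt_irrefl, Int.toNat_zero, List.drop_zero]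
    split <;> simp
  rcases rfind_go_spec (t.take i.toNat) ['\n'] (t.take i.toNat).length with
    ⟨he, hall⟩ | ⟨m, he, hle', hpre, hmax⟩
  · refine ⟨0, by rw [hrw, if_pos he]; simp, by omega, ?_, Or.inl rfl⟩
    intro j _ hj hnl
    exact (nl_prefix_drop_take_iff t i.toNat j hiN).not.mp
      (hall j (by simp [List.length_take]; omega)) ⟨hj, hnl⟩
  · obtain ⟨hm, hnl⟩ := (nl_prefix_drop_take_iff t i.toNat m hiN).mp hpre
    refine ⟨m+1, by rw [hrw, if_neg (by rw [he]; omega), he]; push_cast; ring,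
      by omega, ?_, Or.inr (by simpa using hnl)⟩
    intro j hj1 hj2 hnl'
    exact (nl_prefix_drop_take_iff t i.toNat j hiN).not.mp
      (hmax j (by omega) (by simp [List.length_take]; omega)) ⟨hj2, hnl'⟩

-- t.find('\n', i) (with the e0 == -1 fallback to len): the end of the line containing i
theorem find_nl_end (t : List Char) (iN : Nat) (hiN : iN ≤ t.length) :
    ∃ eN : Nat,
      (if PySem.Chars.findFrom t ['\n'] (iN : Int) == -1 then (t.length : Int)
       else PySem.Chars.findFrom t ['\n'] (iN : Int)) = ↑eN ∧
      iN ≤ eN ∧ eN ≤ t.length ∧ (∀ j : Nat, iN ≤ j → j < eN → t[j]? ≠ some '\n') ∧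
      (eN = t.length ∨ (t[eN]? = some '\n' ∧ eN < t.length)) := by
  by_cases he : PySem.Chars.findFrom t ['\n'] (iN : Int) = -1
  · have hno : ¬ (['\n'] : List Char) <:+: t.drop iN :=
      (PySem.Chars.findFrom_natCast_eq_neg_one_iff t ['\n'] iN hiN).mp he
    refine ⟨t.length, by simp [he], hiN, le_refl _, ?_, Or.inl rfl⟩
    intro j hj1 hj2 hnl
    apply hno
    have hpre : (['\n'] : List Char) <+: (t.drop iN).drop (j - iN) := by
      rw [List.drop_drop, singleton_prefix_iff, List.head?_drop]
      rw [show iN + (j - iN) = j by omega]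
      exact hnl
    exact hpre.isInfix.trans (List.drop_suffix _ _).isInfix
  · obtain ⟨hge, hpre, hmin⟩ := PySem.Chars.findFrom_natCast_spec t ['\n'] iN hiN he
    set e0 := PySem.Chars.findFrom t ['\n'] (iN : Int) with he0
    have h0 : (0:Int) ≤ e0 := le_trans (by omega) hge
    set eN := e0.toNat with heN
    have hcast : e0 = ↑eN := by omega
    have hnl : t[eN]? = some '\n' := by
      have := (singleton_prefix_iff _ '\n').mp hpre
      rwa [List.head?_drop] at this
    have hlt : eN < t.length := by
      rcases List.getElem?_eq_some_iff.mp hnl with ⟨h, _⟩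
      exact h
    refine ⟨eN, by simp [he, hcast], by omega, by omega, ?_, Or.inr ⟨hnl, hlt⟩⟩
    intro j hj1 hj2 hnl'
    apply hmin j hj1 hj2
    rw [singleton_prefix_iff, List.head?_drop]
    exact hnl'

-- a region [a, a+m) of t with no pearson-occurrence start strictly inside gives pearson-free lines
theorem no_p_in_take (t : List Char) (a m : Nat)
    (hocc : ∀ j : Nat, a ≤ j → j < a + m → ¬ ("pearson".toList <+: t.drop j)) :
    ∀ l ∈ pvLines ((t.drop a).take m), PySem.Chars.isIn "pearson".toList l = false := by
  intro l hl
  rw [PySem.Chars.isIn_eq_false_iff]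
  intro hinf
  have hinf' : "pearson".toList <:+: (t.drop a).take m := hinf.trans (mem_pvLines_infix _ l hl)
  obtain ⟨x, y, hxy⟩ := hinf'
  have hlenx : x.length + 7 ≤ m := by
    have := congrArg List.length hxy
    simp [List.length_take] at this
    have h7 : ("pearson".toList).length = 7 := by decide
    omega
  have hpre : "pearson".toList <+: t.drop (a + x.length) := by
    have h1 : ((t.drop a).take m).drop x.length = "pearson".toList ++ y := by
      rw [← hxy, List.append_assoc, List.drop_left]
    have h1 : "pearson".toList <+: ((t.drop a).take m).drop x.length := ⟨y, h1.symm⟩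
    rw [List.drop_take, List.drop_drop] at h1
    exact (List.prefix_take_iff.mp h1).1
  exact hocc (a + x.length) (by omega) (by omega) hpre

set_option maxRecDepth 8192 in
theorem scanB_main (t : List Char) : ∀ (fuel k : Nat) (hr hp : Bool),
    k ≤ t.length → (k = 0 ∨ t[k-1]? = some '\n') → t.length + 1 - k ≤ fuel →
    pvScanB t fuel (PySem.Chars.findFrom t "pearson".toList (k : Int)) hr hp =
      (hr || (pvLines (t.drop k)).any (fun l =>
          PySem.Chars.isIn "india".toList l && PySem.Chars.isIn "pearson".toList l),
       hp || (pvLines (t.drop k)).any (fun l =>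
          PySem.Chars.isIn "pearson".toList l && !PySem.Chars.isIn "india".toList l)) := by
  intro fuel
  induction fuel with
  | zero => intro k hr hp hk hb hf; omega
  | succ f ih =>
      intro k hr hp hk hb hf
      by_cases hi : PySem.Chars.findFrom t "pearson".toList (k : Int) = -1
      · -- no pearson at all in the remaining text: flags unchanged
        rw [hi, scanB_neg_one]
        have hno : ¬ "pearson".toList <:+: t.drop k :=
          (PySem.Chars.findFrom_natCast_eq_neg_one_iff t "pearson".toList k hk).mp hi
        have hfalse : ∀ l ∈ pvLines (t.drop k), PySem.Chars.isIn "pearson".toList l = false := by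
          intro l hl
          rw [PySem.Chars.isIn_eq_false_iff]
          exact fun hinf => hno (hinf.trans (mem_pvLines_infix _ l hl))
        have h1 : (pvLines (t.drop k)).any
            (fun l => PySem.Chars.isIn "india".toList l && PySem.Chars.isIn "pearson".toList l) = false :=
          List.any_eq_false.mpr (fun l hl => by rw [hfalse l hl]; simp)
        have h2 : (pvLines (t.drop k)).any
            (fun l => PySem.Chars.isIn "pearson".toList l && !PySem.Chars.isIn "india".toList l) = false :=
          List.any_eq_false.mpr (fun l hl => by rw [hfalse l hl]; simp)
        rw [h1, h2, Bool.or_false, Bool.or_false]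
      · -- a pearson occurrence exists
        obtain ⟨hki, hprefix, hmin⟩ := PySem.Chars.findFrom_natCast_spec t "pearson".toList k hk hi
        set i := PySem.Chars.findFrom t "pearson".toList (k : Int) with hidef
        set iN := i.toNat with hiNdef
        have h0i : (0:Int) ≤ i := le_trans (by omega) hki
        have hicast : i = ↑iN := by omega
        have hkiN : k ≤ iN := by omega
        have hlen7 : iN + 7 ≤ t.length := by
          have := hprefix.length_le
          simp [List.length_drop] at this
          have h7 : ("pearson".toList).length = 7 := by decide
          omega
        -- the enclosing line [sN, eN)
        obtain ⟨sN, hs_eq, hsle, hs_nonl, hs_bound⟩ :=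
          rfind_nl_start t i h0i (by omega)
        have hfe := find_nl_end t iN (by omega)
        rw [← hicast] at hfe
        obtain ⟨eN, he_eq, hie, helen, he_nonl, he_bound⟩ := hfe
        have hksN : k ≤ sN := by
          by_contra hlt
          push_neg at hlt
          rcases hb with h0 | hnlk
          · omega
          · exact hs_nonl (k-1) (by omega) (by omega) hnlk
        -- one unfolding step of the scan
        have hstep : pvScanB t (f+1) i hr hp =
            (if PySem.Chars.isIn "india".toList (PySem.Chars.slice t (some (↑sN:Int)) (some (↑eN:Int))) then
               pvScanB t f (PySem.Chars.findFrom t "pearson".toList ((↑eN:Int) + 1)) true hp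
             else
               pvScanB t f (PySem.Chars.findFrom t "pearson".toList ((↑eN:Int) + 1)) hr true) := by
          have hne : (i == -1) = false := by simp [hi]
          simp only [pvScanB, hne, Bool.false_eq_true, if_false]
          rw [hs_eq, he_eq]
        set seg := PySem.Chars.slice t (some (↑sN:Int)) (some (↑eN:Int)) with hsegdef
        have hseg : seg = (t.drop sN).take (eN - sN) := by
          rw [hsegdef, PySem.Chars.slice_eq_listSlice, PySem.List.slice_natCast]
        have hno_nl : ∀ j : Nat, sN ≤ j → j < eN → t[j]? ≠ some '\n' := by
          intro j h1 h2
          rcases Nat.lt_or_ge j iN with h | h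
          · exact hs_nonl j h1 h
          · exact he_nonl j h h2
        have hnl_seg : '\n' ∉ seg := by
          rw [hseg]
          intro hmem
          obtain ⟨p, hp'⟩ := List.mem_iff_getElem?.mp hmem
          have hplt : p < ((t.drop sN).take (eN - sN)).length := (List.getElem?_eq_some_iff.mp hp').1
          have hplen : p < eN - sN := by
            simp [List.length_take] at hplt
            omega
          rw [List.getElem?_take_of_lt hplen, List.getElem?_drop] at hp'
          exact hno_nl (sN + p) (by omega) (by omega) hp'
        have hi7e : iN + 7 ≤ eN := by
          rcases he_bound with hEq | ⟨hnl, hlt⟩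
          · omega
          · by_contra hcon
            push_neg at hcon
            have h7 : ("pearson".toList).length = 7 := by decide
            have hj : eN - iN < ("pearson".toList).length := by omega
            have hgp := prefix_getElem? hprefix hj
            rw [List.getElem?_drop, show iN + (eN - iN) = eN by omega, hnl] at hgp
            have hPmem : "pearson".toList[eN - iN] ∈ "pearson".toList := List.getElem_mem _
            have hall : ("pearson".toList.all (fun c => c != '\n')) = true := by decide
            have hPnl : "pearson".toList[eN - iN] ≠ '\n' := by
              simpa using List.all_eq_true.mp hall _ hPmem
            exact hPnl (Option.some.inj hgp).symm
        have hP_seg : PySem.Chars.isIn "pearson".toList seg = true := by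
          rw [← PySem.Chars.exists_prefix_drop_iff_isIn]
          refine ⟨iN - sN, ?_⟩
          rw [hseg, List.drop_take, List.drop_drop, show sN + (iN - sN) = iN by omega]
          rw [List.prefix_take_iff]
          refine ⟨hprefix, ?_⟩
          have h7 : ("pearson".toList).length = 7 := by decide
          omega
        have hdecomp : t.drop k = (t.drop k).take (sN - k) ++ (seg ++ t.drop eN) := by
          rw [hseg]
          conv_lhs => rw [← List.take_append_drop (sN - k) (t.drop k)]
          congr 1
          rw [List.drop_drop, show k + (sN - k) = sN by omega]
          conv_lhs => rw [← List.take_append_drop (eN - sN) (t.drop sN)]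
          congr 1
          rw [List.drop_drop, show sN + (eN - sN) = eN by omega]
        have hsegrest : ∃ tail : List (List Char),
            pvLines (seg ++ t.drop eN) = seg :: tail ∧
            ((eN = t.length ∧ tail = []) ∨ (eN < t.length ∧ tail = pvLines (t.drop (eN+1)))) := by
          rcases he_bound with hEq | ⟨hnl, hlt⟩
          · refine ⟨[], ?_, Or.inl ⟨hEq, rfl⟩⟩
            rw [hEq, List.drop_length, List.append_nil, pvLines_no_nl seg hnl_seg]
          · have hg : t[eN]'hlt = '\n' := by
              have := (List.getElem?_eq_some_iff.mp hnl).2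
              exact this
            refine ⟨pvLines (t.drop (eN+1)), ?_, Or.inr ⟨hlt, rfl⟩⟩
            rw [List.drop_eq_getElem_cons hlt, hg, pvLines_append_nl, pvLines_no_nl seg hnl_seg]
            rfl
        obtain ⟨tail, hsr, htail⟩ := hsegrest
        have hassemble : ∃ pref : List (List Char),
            pvLines (t.drop k) = pref ++ (seg :: tail) ∧
            (∀ l ∈ pref, PySem.Chars.isIn "pearson".toList l = false) := by
          by_cases hsk : sN = k
          · refine ⟨[], ?_, by simp⟩
            rw [hdecomp, hsk, Nat.sub_self, List.take_zero, List.nil_append, hsr, List.nil_append]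
          · rcases hs_bound with h0 | hnlS
            · omega
            · have hklt : k < sN := by omega
              have hpre_split : (t.drop k).take (sN - k)
                  = (t.drop k).take (sN - k - 1) ++ ['\n'] := by
                rw [show sN - k = (sN - k - 1) + 1 by omega, List.take_succ]
                congr 1
                rw [List.getElem?_drop, show k + (sN - k - 1) = sN - 1 by omega, hnlS]
                rfl
              refine ⟨pvLines ((t.drop k).take (sN - k - 1)), ?_, ?_⟩
              · conv_lhs => rw [hdecomp]
                rw [hpre_split, List.append_assoc, List.singleton_append,
                   pvLines_append_nl, hsr]
              · exact no_p_in_take t k (sN - k - 1)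
                  (fun j hj1 hj2 => hmin j hj1 (by omega))
        obtain ⟨pref, hsplit, hprefF⟩ := hassemble
        have hany1 : (pvLines (t.drop k)).any
            (fun l => PySem.Chars.isIn "india".toList l && PySem.Chars.isIn "pearson".toList l)
            = ((PySem.Chars.isIn "india".toList seg && PySem.Chars.isIn "pearson".toList seg)
               || tail.any (fun l => PySem.Chars.isIn "india".toList l && PySem.Chars.isIn "pearson".toList l)) := by
          rw [hsplit, List.any_append, List.any_cons,
            List.any_eq_false.mpr (fun l hl => by rw [hprefF l hl]; simp)]
          simp
        have hany2 : (pvLines (t.drop k)).any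
            (fun l => PySem.Chars.isIn "pearson".toList l && !PySem.Chars.isIn "india".toList l)
            = ((PySem.Chars.isIn "pearson".toList seg && !PySem.Chars.isIn "india".toList seg)
               || tail.any (fun l => PySem.Chars.isIn "pearson".toList l && !PySem.Chars.isIn "india".toList l)) := by
          rw [hsplit, List.any_append, List.any_cons,
            List.any_eq_false.mpr (fun l hl => by rw [hprefF l hl]; simp)]
          simp
        rw [hicast] at hstep ⊢
        rw [hstep]
        have hcast2 : ((eN:Int)) + 1 = ((eN + 1 : Nat) : Int) := by push_cast; ring
        rcases htail with ⟨hEq, htl⟩ | ⟨hlt, htl⟩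
        · have hnext : PySem.Chars.findFrom t "pearson".toList ((↑eN:Int)+1) = -1 :=
            findFrom_past_len _ _ _ (by rw [hEq]; omega)
          by_cases hI : PySem.Chars.isIn "india".toList seg = true
          · rw [if_pos hI, hnext, scanB_neg_one, hany1, hany2, htl, hI, hP_seg]
            simp
          · have hIf : PySem.Chars.isIn "india".toList seg = false := by simpa using hI
            rw [if_neg hI, hnext, scanB_neg_one, hany1, hany2, htl, hIf, hP_seg]
            simp
        · have hnl2 : t[eN]? = some '\n' := by
            rcases he_bound with hE | ⟨hx, _⟩
            · omega
            · exact hx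
          have hb' : (eN+1 = 0) ∨ t[(eN+1)-1]? = some '\n' := Or.inr (by simpa using hnl2)
          by_cases hI : PySem.Chars.isIn "india".toList seg = true
          · rw [if_pos hI, hcast2, ih (eN+1) true hp (by omega) hb' (by omega),
               hany1, hany2, htl, hI, hP_seg]
            simp
          · have hIf : PySem.Chars.isIn "india".toList seg = false := by simpa using hI
            rw [if_neg hI, hcast2, ih (eN+1) hr true (by omega) hb' (by omega),
               hany1, hany2, htl, hIf, hP_seg]
            simp

-- both sides' existence tests, expressed over the same split of the original text
theorem any_bridge_ri (text : String) :
    ((PySem.Str.split? text "\n").getD []).any (fun l =>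
        PySem.Str.isIn "india" (PySem.Str.lower l) && PySem.Str.isIn "pearson" (PySem.Str.lower l))
      = (pvLines (PySem.Str.lower text).toList).any (fun l =>
        PySem.Chars.isIn "india".toList l && PySem.Chars.isIn "pearson".toList l) := by
  have h1 : (PySem.Str.split? text "\n").getD []
      = (PySem.Chars.splitOn text.toList ['\n']).map String.ofList := by
    simp [PySem.Str.split?, PySem.Chars.split?]
  have h2 : (PySem.Str.lower text).toList = PySem.Chars.lower text.toList := by simp
  rw [h1, h2, pvLines_lower, ← splitOn_nl_eq_pvLines]
  rw [List.any_map, List.any_map]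
  apply List.any_congr rfl
  intro cs
  simp [Function.comp_def, PySem.Str.isIn]

theorem any_bridge_pl (text : String) :
    ((PySem.Str.split? text "\n").getD []).any (fun l =>
        PySem.Str.isIn "pearson" (PySem.Str.lower l) && !PySem.Str.isIn "india" (PySem.Str.lower l))
      = (pvLines (PySem.Str.lower text).toList).any (fun l =>
        PySem.Chars.isIn "pearson".toList l && !PySem.Chars.isIn "india".toList l) := by
  have h1 : (PySem.Str.split? text "\n").getD []
      = (PySem.Chars.splitOn text.toList ['\n']).map String.ofList := by
    simp [PySem.Str.split?, PySem.Chars.split?]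
  have h2 : (PySem.Str.lower text).toList = PySem.Chars.lower text.toList := by simp
  rw [h1, h2, pvLines_lower, ← splitOn_nl_eq_pvLines]
  rw [List.any_map, List.any_map]
  apply List.any_congr rfl
  intro cs
  simp [Function.comp_def, PySem.Str.isIn]

-- ===== VERDICT (by name: the statement is the Claim_ definition above) =====
theorem extract_publisher_info_spec : Claim_equal_extract_publisher_info := by
  intro text api_publisher _
  unfold Spec_extract_publisher_info extract_publisher_info extract_publisher_info_alt
  have hof : ∀ o : String, PySem.Dict.ofList [("original", o), ("reprint", "")]
      = PySem.Dict.mk [("original", o), ("reprint", "")] := fun o => by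
    simp [PySem.Dict.ofList, PySem.Dict.update, PySem.Dict.insert, PySem.Dict.empty]
  have hfind : PySem.Str.find (PySem.Str.lower text) "pearson"
      = PySem.Chars.findFrom (PySem.Str.lower text).toList "pearson".toList (((0:Nat)) : Int) := by
    simp [PySem.Chars.findFrom_zero, PySem.Str.find]
  have hscan := scanB_main (PySem.Str.lower text).toList
    ((PySem.Str.lower text).toList.length + 1) 0 false false (Nat.zero_le _) (Or.inl rfl) (by omega)
  rw [List.drop_zero] at hscan
  cases api_publisher with
  | none =>
      dsimp only
      rw [hof, foldA_char, hfind, hscan, any_bridge_ri text, any_bridge_pl text]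
      simp
  | some s =>
      dsimp only
      rw [hof, foldA_char, hfind, hscan, any_bridge_ri text, any_bridge_pl text]
      by_cases hs : s == ""
      · simp [hs]
      · simp [hs]
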